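-- pv_equiv track=rewrite | github.com/11NOel11/ChaosBench-Logic | chaosbench/tasks/multi_hop.py | _find_4hop_chains
-- ===== SOURCE A (Python) =====
-- from typing import Any, Dict, List, Tuple
--
-- def _find_4hop_chains(
--     rules: Dict[str, Dict[str, List[str]]]
-- ) -> List[Tuple[str, str, str, str, str, str]]:
--     """Find all valid 4-hop reasoning chains in the FOL rules.
--
--     Args:
--         rules: FOL rules from get_fol_rules().
--
--     Returns:
--         List of (P, Q, R, S, T, chain_type) tuples where:
--         - P→Q→R→S→T through requires (chain_type="requires_4hop") → YES
--         - P→Q→R→S→¬T through requires then excludes (chain_type="mixed_4hop") → NO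
--     """
--     chains = []
--
--     for p, p_rules in rules.items():
--         for q in p_rules.get("requires", []):
--             if q not in rules:
--                 continue
--             q_rules = rules[q]
--
--             for r in q_rules.get("requires", []):
--                 if r not in rules:
--                     continue
--                 r_rules = rules[r]
--
--                 for s in r_rules.get("requires", []):
--                     if s not in rules:
--                         continue
--                     s_rules = rules[s]
--
--                     # P→Q→R→S→T (all requires)
--                     for t in s_rules.get("requires", []):
--                         chains.append((p, q, r, s, t, "requires_4hop"))
--
--                     # P→Q→R→S→¬T (last step excludes)
--                     for t in s_rules.get("excludes", []):
--                         chains.append((p, q, r, s, t, "mixed_4hop"))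
--
--     return chains
-- ===== SOURCE B (Python) =====
-- def _find_4hop_chains(rules):
--     """Recursive-DFS re-implementation: one helper walks requires-edges to depth 4,
--     then emits requires_4hop chains followed by mixed_4hop chains for that prefix."""
--     out = []
--
--     def extend(node, prefix, depth):
--         node_rules = rules[node]
--         if depth == 4:
--             p, q, r, s = prefix
--             for t in node_rules.get("requires", []):
--                 out.append((p, q, r, s, t, "requires_4hop"))
--             for t in node_rules.get("excludes", []):
--                 out.append((p, q, r, s, t, "mixed_4hop"))
--         else:
--             for nxt in node_rules.get("requires", []):
--                 if nxt in rules: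
--                     extend(nxt, prefix + (nxt,), depth + 1)
--
--     for p in rules:
--         extend(p, (p,), 1)
--     return out
-- ===== Notes on version B (the rewrite author's own statement) =====
-- stated objective: alternative
-- what changed: Replaces the 5-deep hand-unrolled loop nest with a recursive DFS helper extend(node, prefix, depth) that follows requires-edges to depth 4 and emits both chain types at the leaf, driven by one outer loop over the rule names.
import Mathlib
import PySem

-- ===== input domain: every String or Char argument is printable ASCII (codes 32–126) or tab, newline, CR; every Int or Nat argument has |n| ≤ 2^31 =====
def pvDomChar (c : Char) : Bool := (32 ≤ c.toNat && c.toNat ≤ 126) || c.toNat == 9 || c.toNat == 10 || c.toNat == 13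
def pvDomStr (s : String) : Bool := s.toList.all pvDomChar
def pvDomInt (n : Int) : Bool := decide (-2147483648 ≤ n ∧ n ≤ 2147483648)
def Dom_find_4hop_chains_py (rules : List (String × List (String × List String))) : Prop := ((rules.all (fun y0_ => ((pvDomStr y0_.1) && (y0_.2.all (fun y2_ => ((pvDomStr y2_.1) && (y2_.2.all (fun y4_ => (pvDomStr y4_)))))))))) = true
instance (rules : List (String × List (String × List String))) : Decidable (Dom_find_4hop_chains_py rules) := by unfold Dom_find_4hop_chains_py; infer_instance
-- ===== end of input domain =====

-- B replaces A's 5-deep hand-unrolled loop nest by a recursive DFS helper (different decomposition, same cost).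
-- Both ports first build the Python dict from the association list with PySem.Dict.ofList (duplicate keys overwrite in place, exactly as dict(pairs)).

-- ===== PORT A =====
def find_4hop_chains_py (rules : List (String × List (String × List String))) : List (String × String × String × String × String × String) :=
  let d : PySem.Dict String (PySem.Dict String (List String)) :=
    PySem.Dict.ofList (rules.map (fun kv => (kv.1, PySem.Dict.ofList kv.2)))
  d.items.foldl (fun chains pq =>
    (pq.2.getD "requires" []).foldl (fun chains q =>
      match d.get? q with
      | none => chains
      | some q_rules =>
        (q_rules.getD "requires" []).foldl (fun chains r =>
          match d.get? r with
          | none => chains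
          | some r_rules =>
            (r_rules.getD "requires" []).foldl (fun chains s =>
              match d.get? s with
              | none => chains
              | some s_rules =>
                let chains :=
                  (s_rules.getD "requires" []).foldl
                    (fun chains t => chains ++ [(pq.1, q, r, s, t, "requires_4hop")]) chains
                (s_rules.getD "excludes" []).foldl
                  (fun chains t => chains ++ [(pq.1, q, r, s, t, "mixed_4hop")]) chains)
              chains)
          chains)
      chains)
    []

-- ===== PORT B =====
-- DFS helper of Source B: walk requires-edges (fuel = 4 - depth), emit both chain types at the leaf.
def pvExtend (d : PySem.Dict String (PySem.Dict String (List String)))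
    (nrules : PySem.Dict String (List String)) (pref : List String) :
    Nat → List (String × String × String × String × String × String)
  | 0 =>
    match pref with
    | [p, q, r, s] =>
      (nrules.getD "requires" []).map (fun t => (p, q, r, s, t, "requires_4hop"))
        ++ (nrules.getD "excludes" []).map (fun t => (p, q, r, s, t, "mixed_4hop"))
    | _ => []
  | k + 1 =>
    (nrules.getD "requires" []).flatMap (fun nxt =>
      match d.get? nxt with
      | none => []
      | some nr => pvExtend d nr (pref ++ [nxt]) k)

def find_4hop_chains_py_alt (rules : List (String × List (String × List String))) : List (String × String × String × String × String × String) :=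
  let d : PySem.Dict String (PySem.Dict String (List String)) :=
    PySem.Dict.ofList (rules.map (fun kv => (kv.1, PySem.Dict.ofList kv.2)))
  d.items.flatMap (fun kv => pvExtend d kv.2 [kv.1] 3)

-- ===== PRECONDITION & SPEC =====
def Spec_find_4hop_chains_py (rules : List (String × List (String × List String))) (out : List (String × String × String × String × String × String)) : Prop := out = find_4hop_chains_py_alt rules
instance (rules : List (String × List (String × List String))) (out : List (String × String × String × String × String × String)) : Decidable (Spec_find_4hop_chains_py rules out) := by unfold Spec_find_4hop_chains_py; infer_instance

-- ===== CLAIM (what is proved, stated in full; the proofs are below) =====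
def Claim_equal_find_4hop_chains_py : Prop := ∀ (rules : List (String × List (String × List String))), Dom_find_4hop_chains_py rules → Spec_find_4hop_chains_py rules (find_4hop_chains_py rules)

-- ===== LEMMAS AND PROOFS =====

-- A fold whose step appends a chunk independent of the accumulator flattens to flatMap
-- (the library foldl_append_eq_flatMap needs the step syntactically of the form acc ++ g x;
-- this version takes the shape as a hypothesis so it applies through the match on d.get?).
theorem pv_foldl_step_append {α β : Type} (l : List α) (f : List β → α → List β) (g : α → List β)
    (h : ∀ acc x, f acc x = acc ++ g x) : ∀ acc, l.foldl f acc = acc ++ l.flatMap g := by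
  induction l with
  | nil => intro acc; simp
  | cons x xs ih =>
    intro acc
    simp only [List.foldl_cons, List.flatMap_cons, h, ih, List.append_assoc]

theorem pv_level0 (d : PySem.Dict String (PySem.Dict String (List String))) (sr : PySem.Dict String (List String)) (p q r s : String)
    (acc : List (String × String × String × String × String × String)) :
    (sr.getD "excludes" []).foldl
        (fun chains t => chains ++ [(p, q, r, s, t, "mixed_4hop")])
        ((sr.getD "requires" []).foldl
          (fun chains t => chains ++ [(p, q, r, s, t, "requires_4hop")]) acc)
      = acc ++ pvExtend d sr [p, q, r, s] 0 := by
  rw [PySem.List.foldl_append_singleton_eq_map, PySem.List.foldl_append_singleton_eq_map]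
  simp [pvExtend]

theorem pv_level1 (d : PySem.Dict String (PySem.Dict String (List String)))
    (rr : PySem.Dict String (List String)) (p q r : String)
    (acc : List (String × String × String × String × String × String)) :
    (rr.getD "requires" []).foldl (fun chains s =>
        match d.get? s with
        | none => chains
        | some s_rules =>
          let chains :=
            (s_rules.getD "requires" []).foldl
              (fun chains t => chains ++ [(p, q, r, s, t, "requires_4hop")]) chains
          (s_rules.getD "excludes" []).foldl
            (fun chains t => chains ++ [(p, q, r, s, t, "mixed_4hop")]) chains) acc
      = acc ++ pvExtend d rr [p, q, r] 1 := by
  rw [pv_foldl_step_append _ _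
    (fun s => match d.get? s with
      | none => []
      | some sr => pvExtend d sr [p, q, r, s] 0)]
  · simp [pvExtend]
  · intro acc s
    cases hd : d.get? s with
    | none => simp
    | some sr => simpa using pv_level0 d sr p q r s acc

theorem pv_level2 (d : PySem.Dict String (PySem.Dict String (List String)))
    (qr : PySem.Dict String (List String)) (p q : String)
    (acc : List (String × String × String × String × String × String)) :
    (qr.getD "requires" []).foldl (fun chains r =>
        match d.get? r with
        | none => chains
        | some r_rules =>
          (r_rules.getD "requires" []).foldl (fun chains s =>
            match d.get? s with
            | none => chains
            | some s_rules =>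
              let chains :=
                (s_rules.getD "requires" []).foldl
                  (fun chains t => chains ++ [(p, q, r, s, t, "requires_4hop")]) chains
              (s_rules.getD "excludes" []).foldl
                (fun chains t => chains ++ [(p, q, r, s, t, "mixed_4hop")]) chains) chains) acc
      = acc ++ pvExtend d qr [p, q] 2 := by
  rw [pv_foldl_step_append _ _
    (fun r => match d.get? r with
      | none => []
      | some rr => pvExtend d rr [p, q, r] 1)]
  · simp [pvExtend]
  · intro acc r
    cases hd : d.get? r with
    | none => simp
    | some rr => simpa using pv_level1 d rr p q r acc

theorem pv_level3 (d : PySem.Dict String (PySem.Dict String (List String)))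
    (pr : PySem.Dict String (List String)) (p : String)
    (acc : List (String × String × String × String × String × String)) :
    (pr.getD "requires" []).foldl (fun chains q =>
        match d.get? q with
        | none => chains
        | some q_rules =>
          (q_rules.getD "requires" []).foldl (fun chains r =>
            match d.get? r with
            | none => chains
            | some r_rules =>
              (r_rules.getD "requires" []).foldl (fun chains s =>
                match d.get? s with
                | none => chains
                | some s_rules =>
                  let chains :=
                    (s_rules.getD "requires" []).foldl
                      (fun chains t => chains ++ [(p, q, r, s, t, "requires_4hop")]) chains
                  (s_rules.getD "excludes" []).foldl
                    (fun chains t => chains ++ [(p, q, r, s, t, "mixed_4hop")]) chains) chains) chains) acc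
      = acc ++ pvExtend d pr [p] 3 := by
  rw [pv_foldl_step_append _ _
    (fun q => match d.get? q with
      | none => []
      | some qr => pvExtend d qr [p, q] 2)]
  · simp [pvExtend]
  · intro acc q
    cases hd : d.get? q with
    | none => simp
    | some qr => simpa using pv_level2 d qr p q acc

-- ===== VERDICT (by name: the statement is the Claim_ definition above) =====
theorem find_4hop_chains_py_spec : Claim_equal_find_4hop_chains_py := by
  intro rules _
  unfold Spec_find_4hop_chains_py find_4hop_chains_py find_4hop_chains_py_alt
  rw [pv_foldl_step_append _ _
    (fun kv => pvExtend (PySem.Dict.ofList (rules.map (fun kv => (kv.1, PySem.Dict.ofList kv.2)))) kv.2 [kv.1] 3)]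
  · simp
  · intro acc pq
    simpa using pv_level3 _ pq.2 pq.1 acc
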